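-- pv_equiv track=rewrite | github.com/StarsExpress/LeetCode-Repository | sorting/cards_revelation.py | reveal_cards
-- ===== SOURCE A (Python) =====
-- def reveal_cards(deck: list[int]):  # LeetCode Q.950.
--     if len(deck) <= 1:
--         return deck
--
--     deck.sort()  # Sort from smallest to biggest.
--     if len(deck) == 2:
--         return deck
--
--     desired_deck, idx = deck[-2:], -3  # Iteration starts from the 3rd biggest card.
--     while len(desired_deck) != len(deck):
--         desired_deck.insert(0, deck[idx])
--         desired_deck.insert(1, desired_deck.pop(-1))
--         idx -= 1
--
--     return desired_deck
-- ===== SOURCE B (Python) =====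
-- def reveal_cards(deck: list[int]):  # LeetCode Q.950.
--     if len(deck) <= 1:
--         return deck
--     # Reverse simulation on a two-stack deque: contents = reversed(front) + back.
--     front, back = [], []
--     for card in sorted(deck, reverse=True):
--         if front or back:
--             if not back:
--                 front.reverse()
--                 back, front = front, []
--             front.append(back.pop())
--         front.append(card)
--     front.reverse()
--     return front + back
-- ===== Notes on version B (the rewrite author's own statement) =====
-- stated objective: faster
-- what changed: Replaces A's quadratic loop of list.insert(0,...)/pop(-1) front-insertions with a reverse deck simulation on a two-stack deque (amortized O(1) rotate/appendleft per card) over the descending-sorted deck.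
import Mathlib
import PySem

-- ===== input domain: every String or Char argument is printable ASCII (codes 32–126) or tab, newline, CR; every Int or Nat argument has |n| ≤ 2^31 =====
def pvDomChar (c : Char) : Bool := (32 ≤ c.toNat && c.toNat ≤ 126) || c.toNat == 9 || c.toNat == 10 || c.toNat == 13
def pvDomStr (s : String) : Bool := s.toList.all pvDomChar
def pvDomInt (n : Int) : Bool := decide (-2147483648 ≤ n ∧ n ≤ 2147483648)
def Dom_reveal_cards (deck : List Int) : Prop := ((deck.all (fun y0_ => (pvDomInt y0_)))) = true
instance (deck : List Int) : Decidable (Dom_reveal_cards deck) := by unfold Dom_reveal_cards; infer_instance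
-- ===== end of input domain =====

-- B replaces A's O(n^2) front-insert loop by a reverse deck simulation on a two-stack
-- deque (amortized O(1) per card), O(n log n) overall; equivalence is about the RETURN
-- value only (Python A sorts its argument in place, B does not mutate it).

-- ===== PORT A =====
-- desired_deck.insert(0, deck[idx]); desired_deck.insert(1, desired_deck.pop(-1))
def stepA (dd : List Int) (x : Int) : List Int :=
  match PySem.List.pop? (x :: dd) with
  | some (l, rem) => PySem.List.insert rem 1 l
  | none => []

-- the while loop: fuel = number of iterations until len(desired_deck) == len(deck)
def loopA (deck : List Int) (dd : List Int) (idx : Int) : Nat → List Int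
  | 0 => dd
  | Nat.succ k =>
    match PySem.List.pyGet? deck idx with
    | none => dd
    | some x => loopA deck (stepA dd x) (idx - 1) k

def reveal_cards (deck : List Int) : List Int :=
  if deck.length ≤ 1 then deck
  else
    let d := PySem.List.sorted deck (fun x => x)
    if d.length = 2 then d
    else loopA d (PySem.List.slice d (some (-2)) none) (-3) (d.length - 2)

-- ===== PORT B =====
-- the deque holds st.1.reverse ++ st.2; one loop body: rotate right (if nonempty), appendleft card
def stepB (st : List Int × List Int) (card : Int) : List Int × List Int :=
  let (front, back) :=
    if st.1 ≠ [] ∨ st.2 ≠ [] then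
      let fb := if st.2 = [] then (([] : List Int), st.1.reverse) else st
      match PySem.List.pop? fb.2 with
      | some (l, back') => (fb.1 ++ [l], back')
      | none => (fb.1, [])
    else st
  (front ++ [card], back)

def reveal_cards_alt (deck : List Int) : List Int :=
  if deck.length ≤ 1 then deck
  else
    let st := (PySem.List.sorted deck (fun x => x) true).foldl stepB ([], [])
    st.1.reverse ++ st.2

-- ===== PRECONDITION & SPEC =====
def Spec_reveal_cards (deck : List Int) (out : List Int) : Prop := out = reveal_cards_alt deck
instance (deck : List Int) (out : List Int) : Decidable (Spec_reveal_cards deck out) := by unfold Spec_reveal_cards; infer_instance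

-- ===== CLAIM (what is proved, stated in full; the proofs are below) =====
def Claim_equal_reveal_cards : Prop := ∀ (deck : List Int), Dom_reveal_cards deck → Spec_reveal_cards deck (reveal_cards deck)

-- ===== LEMMAS AND PROOFS =====

-- descending sort of a bare Int list is the reverse of the ascending sort
theorem sorted_true_eq_reverse (xs : List Int) :
    PySem.List.sorted xs (fun x => x) true = (PySem.List.sorted xs (fun x => x)).reverse := by
  apply List.Perm.eq_of_pairwise (le := fun a b : Int => b ≤ a)
  · intro a b _ _ h1 h2; omega
  · exact PySem.List.sorted_pairwise_rev xs (fun x => x)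
  · exact List.pairwise_reverse.mpr (PySem.List.sorted_pairwise xs (fun x => x))
  · exact (PySem.List.sorted_perm xs (fun x => x) true).trans
      ((PySem.List.sorted_perm xs (fun x => x) false).symm.trans
        (PySem.List.sorted xs (fun x => x)).reverse_perm.symm)

theorem stepA_concat (ds : List Int) (l x : Int) :
    stepA (ds ++ [l]) x = x :: l :: ds := by
  have h : PySem.List.pop? ((x :: ds) ++ [l]) = some (l, x :: ds) :=
    PySem.List.pop?_last (x :: ds) l
  simp only [stepA]
  rw [show x :: (ds ++ [l]) = (x :: ds) ++ [l] from rfl, h]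
  show PySem.List.insert (x :: ds) 1 l = x :: l :: ds
  rw [PySem.List.insert_ofNat (x :: ds) 1 l (by simp)]
  simp

theorem stepB_abs (f b : List Int) (ds : List Int) (l : Int) (c : Int)
    (habs : f.reverse ++ b = ds ++ [l]) :
    (stepB (f, b) c).1.reverse ++ (stepB (f, b) c).2 = c :: l :: ds := by
  by_cases hb : b = []
  · subst hb
    simp only [List.append_nil] at habs
    have hf : f = l :: ds.reverse := by
      have := congrArg List.reverse habs; simpa using this
    subst hf
    have hpop : PySem.List.pop? (ds ++ [l]) = some (l, ds) := PySem.List.pop?_last ds l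
    simp [stepB, hpop, habs]
  · rcases List.eq_nil_or_concat' b with rfl | ⟨bs, l', rfl⟩
    · exact absurd rfl hb
    have h1 : (f.reverse ++ bs) ++ [l'] = ds ++ [l] := by simpa using habs
    have h2 : l' = l := by
      have := congrArg (fun t => List.getLast? t) h1
      simpa [List.getLast?_concat] using this
    have h3 : f.reverse ++ bs = ds := by
      have := congrArg List.dropLast h1
      simpa using this
    subst h2
    have hpop : PySem.List.pop? (bs ++ [l']) = some (l', bs) := PySem.List.pop?_last bs l'
    simp [stepB, hb, hpop, ← h3]

theorem foldlB_abs (xs : List Int) (f b dd : List Int)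
    (habs : f.reverse ++ b = dd) (hne : dd ≠ []) :
    (xs.foldl stepB (f, b)).1.reverse ++ (xs.foldl stepB (f, b)).2
      = xs.foldl stepA dd := by
  induction xs generalizing f b dd with
  | nil => simpa using habs
  | cons x xs ih =>
    rcases List.eq_nil_or_concat' dd with rfl | ⟨ds, l, rfl⟩
    · exact absurd rfl hne
    have hstepA : stepA (ds ++ [l]) x = x :: l :: ds := stepA_concat ds l x
    have habs' := stepB_abs f b ds l x habs
    simp only [List.foldl_cons, hstepA]
    have := ih (stepB (f, b) x).1 (stepB (f, b) x).2 (x :: l :: ds) habs' (by simp)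
    simpa using this

theorem loopA_eq_foldl (pre : List Int) :
    ∀ (tail dd : List Int), tail ≠ [] →
    loopA (pre ++ tail) dd (-((tail.length : Int) + 1)) pre.length
      = pre.reverse.foldl stepA dd := by
  induction pre using List.reverseRecOn with
  | nil => intro tail dd _; simp [loopA]
  | append_singleton ps x ih =>
    intro tail dd htail
    have hlen : (ps ++ [x]).length = ps.length + 1 := by simp
    have hget : PySem.List.pyGet? ((ps ++ [x]) ++ tail) (-((tail.length : Int) + 1))
        = some x := by
      have hk : ((tail.length : Int) + 1) = ((tail.length + 1 : Nat) : Int) := by push_cast; ring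
      rw [hk, PySem.List.pyGet?_neg_natCast _ _ (by omega)
        (by simp only [List.length_append, List.length_cons, List.length_nil]; omega)]
      have hsub : ((ps ++ [x]) ++ tail).length - (tail.length + 1) = ps.length := by
        simp only [List.length_append, List.length_cons, List.length_nil]; omega
      rw [hsub, List.append_assoc]
      simp
    rw [hlen]
    simp only [loopA, hget]
    have hidx : -((tail.length : Int) + 1) - 1 = -(((x :: tail).length : Int) + 1) := by
      simp; ring
    have hassoc : (ps ++ [x]) ++ tail = ps ++ (x :: tail) := by simp
    rw [hidx, hassoc, ih (x :: tail) (stepA dd x) (by simp)]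
    simp

-- ===== VERDICT (by name: the statement is the Claim_ definition above) =====
theorem reveal_cards_spec : Claim_equal_reveal_cards := by
  intro deck _
  unfold Spec_reveal_cards reveal_cards reveal_cards_alt
  by_cases h1 : deck.length ≤ 1
  · simp [h1]
  · simp only [h1, if_false]
    have hlen : (PySem.List.sorted deck (fun x => x)).length = deck.length := by
      simp
    set d := PySem.List.sorted deck (fun x => x) with hd
    have h2 : 2 ≤ d.length := by omega
    obtain ⟨b, a, r, hrev⟩ : ∃ b a r, d.reverse = b :: a :: r := by
      match hm : d.reverse with
      | [] => exfalso; have := congrArg List.length hm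
              simp only [List.length_reverse, List.length_nil] at this; omega
      | [b] => exfalso; have := congrArg List.length hm
               simp only [List.length_reverse, List.length_cons, List.length_nil] at this; omega
      | b :: a :: r => exact ⟨b, a, r, rfl⟩
    have hdform : d = r.reverse ++ [a, b] := by
      have := congrArg List.reverse hrev; simpa using this
    have hdesc : PySem.List.sorted deck (fun x => x) true = b :: a :: r := by
      rw [sorted_true_eq_reverse, ← hd, hrev]
    rw [hdesc]
    have hfirst : stepB (stepB ([], []) b) a = ([b, a], []) := by
      simp [stepB, PySem.List.pop?, PySem.List.pyIdx?]
    simp only [List.foldl_cons, hfirst]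
    have hfold := foldlB_abs r ([b, a]) [] [a, b] (by simp) (by simp)
    by_cases h3 : d.length = 2
    · have hr : r = [] := by
        have hl2 := congrArg List.length hrev
        simp only [List.length_reverse, List.length_cons] at hl2
        have h0 : r.length = 0 := by omega
        exact List.eq_nil_of_length_eq_zero h0
      subst hr
      simp only [h3, if_true]
      simp only [hdform]
      exact hfold.symm
    · simp only [h3, if_false]
      have hslice : PySem.List.slice d (some (-2)) none = [a, b] := by
        rw [PySem.List.slice_from_neg_ofNat d 2 (by omega), hdform]
        have hx : (r.reverse ++ [a, b]).length - 2 = r.reverse.length := by simp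
        rw [hx, List.drop_left]
      have hfuel : d.length - 2 = r.reverse.length := by
        have h := congrArg List.length hdform
        simp only [List.length_append, List.length_reverse, List.length_cons,
          List.length_nil] at h
        simp only [List.length_reverse]
        omega
      have hloop := loopA_eq_foldl r.reverse [a, b] [a, b] (by simp)
      have hidx : -((([a, b] : List Int).length : Int) + 1) = -3 := by norm_num
      rw [hidx] at hloop
      rw [hslice, hfuel, hdform, hloop]
      simpa using hfold.symm
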